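-- pv_equiv track=rewrite | github.com/vivekmishra5699/portfolio | app.py | generate_contextual_response
-- ===== SOURCE A (Python) =====
-- def generate_contextual_response(query, docs):
--     """Generate contextual response when no specific pattern matches"""
--
--     # Extract the most relevant information from top documents
--     relevant_info = []
--     for doc in docs[:3]:
--         if doc.startswith("Q: ") and "A: " in doc:
--             answer = doc.split("A: ")[1]
--             relevant_info.append(answer)
--         elif any(doc.startswith(prefix) for prefix in ["Personal Info:", "Project:", "Skills in", "Education:", "Interests:"]):
--             relevant_info.append(doc)
--
--     if relevant_info:
--         # Create a contextual response based on available information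
--         return f"Based on what I know, {relevant_info[0][:200]}..." if len(relevant_info[0]) > 200 else relevant_info[0]
--
--     return "I'd be happy to tell you more about my background, projects, or skills. What specifically would you like to know?"
-- ===== SOURCE B (Python) =====
-- def generate_contextual_response(query, docs):
--     """Generate contextual response when no specific pattern matches"""
--     top = docs[:3]
--     n = len(top)
--     # two independent index scans: first Q/A doc, first prefix doc; pick the earlier
--     qa = next((i for i, d in enumerate(top) if d.startswith("Q: ") and "A: " in d), n)
--     pf = next((i for i, d in enumerate(top)
--                if d.startswith(("Personal Info:", "Project:", "Skills in", "Education:", "Interests:"))), n)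
--     i = min(qa, pf)
--     if i == n:
--         return "I'd be happy to tell you more about my background, projects, or skills. What specifically would you like to know?"
--     info = top[i].split("A: ")[1] if i == qa else top[i]
--     return f"Based on what I know, {info[:200]}..." if len(info) > 200 else info
-- ===== Notes on version B (the rewrite author's own statement) =====
-- stated objective: alternative
-- what changed: Instead of accumulating all qualifying docs and indexing the first, B runs two independent first-match index scans over docs[:3] (first Q/A doc, first prefix doc), takes the smaller index, and formats that single doc.
import Mathlib
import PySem

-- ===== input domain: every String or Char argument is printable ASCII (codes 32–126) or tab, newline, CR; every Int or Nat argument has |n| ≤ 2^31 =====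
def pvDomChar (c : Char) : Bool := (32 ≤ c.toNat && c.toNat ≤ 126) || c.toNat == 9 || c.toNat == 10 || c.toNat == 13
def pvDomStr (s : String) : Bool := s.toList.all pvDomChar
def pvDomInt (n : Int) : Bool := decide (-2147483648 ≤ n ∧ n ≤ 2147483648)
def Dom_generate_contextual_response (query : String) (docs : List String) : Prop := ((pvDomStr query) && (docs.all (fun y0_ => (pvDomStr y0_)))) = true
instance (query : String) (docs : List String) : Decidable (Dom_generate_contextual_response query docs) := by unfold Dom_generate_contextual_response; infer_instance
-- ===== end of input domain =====

-- B replaces A's accumulate-all-then-take-first list build by two independent first-match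
-- index scans (first Q/A doc, first prefix doc) over docs[:3], taking the earlier index (simpler decomposition).


-- ===== PORT A =====
def gcrPrefixesA : List String :=
  ["Personal Info:", "Project:", "Skills in", "Education:", "Interests:"]

def generate_contextual_response (query : String) (docs : List String) : String :=
  let relevant_info : List String :=
    (PySem.List.slice docs none (some 3)).foldl
      (fun acc doc =>
        if PySem.Str.startswith doc "Q: " && PySem.Str.isIn "A: " doc then
          -- doc.split("A: ")[1]: the '"A: " in doc' guard guarantees index 1 exists,
          -- so the .getD "" default is unreachable (IndexError cannot occur here)
          acc ++ [(PySem.List.pyGet? ((PySem.Str.split? doc "A: ").getD []) 1).getD ""]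
        else if gcrPrefixesA.any (fun p => PySem.Str.startswith doc p) then
          acc ++ [doc]
        else acc) []
  match relevant_info with
  | info :: _ =>
      if 200 < PySem.Str.len info then
        "Based on what I know, " ++ PySem.Str.slice info none (some 200) ++ "..."
      else info
  | [] => "I'd be happy to tell you more about my background, projects, or skills. What specifically would you like to know?"

-- ===== PORT B =====
def gcrPrefixesB : List String :=
  ["Personal Info:", "Project:", "Skills in", "Education:", "Interests:"]

-- next((i for i, d in enumerate(top) if p(d)), len(top)): first index satisfying p, else length
def gcrFirstIdx (p : String → Bool) : List String → Nat
  | [] => 0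
  | d :: t => if p d then 0 else gcrFirstIdx p t + 1

def gcrQaPred (d : String) : Bool := PySem.Str.startswith d "Q: " && PySem.Str.isIn "A: " d
def gcrPfPred (d : String) : Bool := gcrPrefixesB.any (fun p => PySem.Str.startswith d p)

-- top[i].split("A: ")[1]; guarded by the Q/A predicate, so the defaults are unreachable
def gcrAnswer (d : String) : String :=
  (PySem.List.pyGet? ((PySem.Str.split? d "A: ").getD []) 1).getD ""

def gcrFormat (info : String) : String :=
  if 200 < PySem.Str.len info then
    "Based on what I know, " ++ PySem.Str.slice info none (some 200) ++ "..."
  else info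

def generate_contextual_response_alt (query : String) (docs : List String) : String :=
  let top := PySem.List.slice docs none (some 3)
  let qa := gcrFirstIdx gcrQaPred top
  let pf := gcrFirstIdx gcrPfPred top
  let i := min qa pf
  if i = top.length then
    "I'd be happy to tell you more about my background, projects, or skills. What specifically would you like to know?"
  else
    gcrFormat (if i = qa then gcrAnswer ((PySem.List.pyGet? top (i : Int)).getD "")
               else (PySem.List.pyGet? top (i : Int)).getD "")

-- ===== PRECONDITION & SPEC =====
def Spec_generate_contextual_response (query : String) (docs : List String) (out : String) : Prop := out = generate_contextual_response_alt query docs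
instance (query : String) (docs : List String) (out : String) : Decidable (Spec_generate_contextual_response query docs out) := by unfold Spec_generate_contextual_response; infer_instance

-- ===== CLAIM =====
def Claim_equal_generate_contextual_response : Prop := ∀ (query : String) (docs : List String), Dom_generate_contextual_response query docs → Spec_generate_contextual_response query docs (generate_contextual_response query docs)

-- ===== LEMMAS AND PROOFS =====

-- proof-side characterisation of which value (if any) a doc contributes in A
def gcrPick (doc : String) : Option String :=
  if gcrQaPred doc then some (gcrAnswer doc)
  else if gcrPfPred doc then some doc
  else none

lemma gcr_body_eq (acc : List String) (doc : String) :
    (if PySem.Str.startswith doc "Q: " && PySem.Str.isIn "A: " doc then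
        acc ++ [(PySem.List.pyGet? ((PySem.Str.split? doc "A: ").getD []) 1).getD ""]
      else if gcrPrefixesA.any (fun p => PySem.Str.startswith doc p) then
        acc ++ [doc]
      else acc)
    = acc ++ (gcrPick doc).elim [] (fun v => [v]) := by
  unfold gcrPick gcrQaPred gcrPfPred gcrAnswer
  split_ifs <;> simp_all [gcrPrefixesA, gcrPrefixesB]

lemma foldl_opt_append {α β : Type} (g : α → Option β) :
    ∀ (l : List α) (acc : List β),
      l.foldl (fun acc x => acc ++ (g x).elim [] (fun v => [v])) acc = acc ++ l.filterMap g := by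
  intro l
  induction l with
  | nil => simp
  | cons d t ih =>
      intro acc
      cases h : g d <;> simp [List.foldl_cons, h, ih]

lemma gcr_foldl_eq_filterMap (l : List String) :
    l.foldl
      (fun acc doc =>
        if PySem.Str.startswith doc "Q: " && PySem.Str.isIn "A: " doc then
          acc ++ [(PySem.List.pyGet? ((PySem.Str.split? doc "A: ").getD []) 1).getD ""]
        else if gcrPrefixesA.any (fun p => PySem.Str.startswith doc p) then
          acc ++ [doc]
        else acc) []
    = l.filterMap gcrPick := by
  have hfun : (fun (acc : List String) (doc : String) =>
      if PySem.Str.startswith doc "Q: " && PySem.Str.isIn "A: " doc then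
        acc ++ [(PySem.List.pyGet? ((PySem.Str.split? doc "A: ").getD []) 1).getD ""]
      else if gcrPrefixesA.any (fun p => PySem.Str.startswith doc p) then
        acc ++ [doc]
      else acc)
      = (fun acc doc => acc ++ (gcrPick doc).elim [] (fun v => [v])) := by
    funext acc doc; exact gcr_body_eq acc doc
  rw [hfun, foldl_opt_append gcrPick]
  rfl

-- B's two-index-scan core agrees with the first element of A's filterMap, on ANY list
lemma gcr_core_eq (l : List String) :
    (if min (gcrFirstIdx gcrQaPred l) (gcrFirstIdx gcrPfPred l) = l.length then
      "I'd be happy to tell you more about my background, projects, or skills. What specifically would you like to know?"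
    else
      gcrFormat (if min (gcrFirstIdx gcrQaPred l) (gcrFirstIdx gcrPfPred l) = gcrFirstIdx gcrQaPred l then
          gcrAnswer ((PySem.List.pyGet? l ((min (gcrFirstIdx gcrQaPred l) (gcrFirstIdx gcrPfPred l) : Nat) : Int)).getD "")
        else (PySem.List.pyGet? l ((min (gcrFirstIdx gcrQaPred l) (gcrFirstIdx gcrPfPred l) : Nat) : Int)).getD ""))
    = (match l.filterMap gcrPick with
       | info :: _ => gcrFormat info
       | [] => "I'd be happy to tell you more about my background, projects, or skills. What specifically would you like to know?") := by
  induction l with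
  | nil => rfl
  | cons d t ih =>
      rw [List.filterMap_cons]
      by_cases hq : gcrQaPred d = true
      · simp [gcrFirstIdx, gcrPick, hq]
      · by_cases hp : gcrPfPred d = true
        · have hqa : gcrFirstIdx gcrQaPred (d :: t) = gcrFirstIdx gcrQaPred t + 1 := by
            simp [gcrFirstIdx, hq]
          simp [gcrFirstIdx, gcrPick, hq, hp]
        · have hqa : gcrFirstIdx gcrQaPred (d :: t) = gcrFirstIdx gcrQaPred t + 1 := by
            simp [gcrFirstIdx, hq]
          have hpf : gcrFirstIdx gcrPfPred (d :: t) = gcrFirstIdx gcrPfPred t + 1 := by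
            simp [gcrFirstIdx, hp]
          have hmin : min (gcrFirstIdx gcrQaPred (d :: t)) (gcrFirstIdx gcrPfPred (d :: t))
              = min (gcrFirstIdx gcrQaPred t) (gcrFirstIdx gcrPfPred t) + 1 := by
            rw [hqa, hpf]; omega
          have hpick : gcrPick d = none := by simp [gcrPick, hq, hp]
          rw [hmin, hqa, hpick, ← ih]
          have hget : ∀ m : Nat, (PySem.List.pyGet? (d :: t) ((m + 1 : Nat) : Int)).getD ""
              = (PySem.List.pyGet? t ((m : Nat) : Int)).getD "" := by
            intro m; simp [PySem.List.pyGet?_natCast]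
          simp only [List.length_cons, Nat.add_right_cancel_iff, hget]

-- ===== VERDICT =====
theorem generate_contextual_response_spec : Claim_equal_generate_contextual_response := by
  intro query docs _
  unfold Spec_generate_contextual_response generate_contextual_response generate_contextual_response_alt
  rw [gcr_foldl_eq_filterMap]
  exact (gcr_core_eq _).symm
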